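-- pv_equiv track=rewrite | github.com/manjikian/image_squarifier | image_squarifier.py | get_majority_interval
-- ===== SOURCE A (Python) =====
-- def get_majority_interval(avg, colors):
--     """
--     The function will check for each color component if the majority of colors are grater than the average or
--     less than. If the majority is grater, a value of 1 will be returned otherwise 0
--
--     :param avg: The average value of each color component as a tuple (R,G,B)
--     :param colors: The list of colors, where each color is (R,G,B) tuple
--     :return: A tuple of 3 items, each item is either 0 or 1
--     """
--     countR, countG, countB = (0, 0, 0)
--     for c in colors:
--         if c[0] < avg[0]:
--             countR += 1
--         if c[1] < avg[1]:
--             countG += 1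
--         if c[2] < avg[2]:
--             countB += 1
--     r, g, b = (0, 0, 0)
--     if countR < (len(colors) / 2):
--         r = 1
--     if countG < (len(colors) / 2):
--         g = 1
--     if countB < (len(colors) / 2):
--         b = 1
--     return (r, g, b)
-- ===== SOURCE B (Python) =====
-- def get_majority_interval(avg, colors):
--     if not colors:
--         return (0, 0, 0)
--     m = (len(colors) - 1) // 2
--     return tuple(1 if sorted(c[i] for c in colors)[m] >= avg[i] else 0 for i in range(3))
-- ===== Notes on version B (the rewrite author's own statement) =====
-- stated objective: alternative
-- what changed: Replaces A's counting-and-threshold pass by an order-statistic formulation: per channel it sorts the component values and compares the lower median (index (n-1)//2) with the average, which is 1 exactly when fewer than half the colors lie below the average.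
import Mathlib
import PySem

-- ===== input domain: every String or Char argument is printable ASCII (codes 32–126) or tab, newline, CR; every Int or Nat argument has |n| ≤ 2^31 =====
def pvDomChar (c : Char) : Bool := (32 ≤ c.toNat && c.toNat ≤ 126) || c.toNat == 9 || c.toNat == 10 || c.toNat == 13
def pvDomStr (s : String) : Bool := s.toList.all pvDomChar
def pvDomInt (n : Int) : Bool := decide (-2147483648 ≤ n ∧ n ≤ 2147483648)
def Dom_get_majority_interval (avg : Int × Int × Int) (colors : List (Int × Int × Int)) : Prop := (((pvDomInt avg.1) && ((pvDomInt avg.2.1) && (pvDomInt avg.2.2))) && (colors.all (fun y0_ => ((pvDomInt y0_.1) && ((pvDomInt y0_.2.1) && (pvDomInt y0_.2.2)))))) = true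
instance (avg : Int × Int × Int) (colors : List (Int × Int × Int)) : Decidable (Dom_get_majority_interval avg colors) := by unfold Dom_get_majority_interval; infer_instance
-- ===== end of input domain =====

-- B replaces A's counting-and-threshold pass by an order statistic: per channel it sorts the
-- component values and compares the lower median (index (n-1)//2) with the average (alternative
-- algorithm; return value proved equal).

-- ===== PORT A =====
-- Python's float test `count < len(colors)/2` is exact as the integer test `2*count < n` at these magnitudes.
def get_majority_interval (avg : Int × Int × Int) (colors : List (Int × Int × Int)) : Int × Int × Int :=
  let counts := colors.foldl (fun (s : Int × Int × Int) c =>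
    (s.1 + (if c.1 < avg.1 then 1 else 0),
     s.2.1 + (if c.2.1 < avg.2.1 then 1 else 0),
     s.2.2 + (if c.2.2 < avg.2.2 then 1 else 0))) (0, 0, 0)
  let n : Int := colors.length
  let r : Int := if 2 * counts.1 < n then 1 else 0
  let g : Int := if 2 * counts.2.1 < n then 1 else 0
  let b : Int := if 2 * counts.2.2 < n then 1 else 0
  (r, g, b)

-- ===== PORT B =====
-- one channel: sort the component values and compare the lower median with the average;
-- the index m = (n-1)//2 is in range for a nonempty list, so `.getD m 0` is exact for Python's `[m]`
def gmiChannel (a : Int) (vs : List Int) (m : Nat) : Int :=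
  if a ≤ (PySem.List.sorted vs (fun x => x) false).getD m 0 then 1 else 0

def get_majority_interval_alt (avg : Int × Int × Int) (colors : List (Int × Int × Int)) : Int × Int × Int :=
  if colors = [] then (0, 0, 0)
  else
    let m : Nat := (colors.length - 1) / 2
    (gmiChannel avg.1 (colors.map (fun c => c.1)) m,
     gmiChannel avg.2.1 (colors.map (fun c => c.2.1)) m,
     gmiChannel avg.2.2 (colors.map (fun c => c.2.2)) m)

-- ===== PRECONDITION & SPEC =====
def Spec_get_majority_interval (avg : Int × Int × Int) (colors : List (Int × Int × Int)) (out : Int × Int × Int) : Prop := out = get_majority_interval_alt avg colors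
instance (avg : Int × Int × Int) (colors : List (Int × Int × Int)) (out : Int × Int × Int) : Decidable (Spec_get_majority_interval avg colors out) := by unfold Spec_get_majority_interval; infer_instance

-- ===== CLAIM (what is proved, stated in full; the proofs are below) =====
def Claim_equal_get_majority_interval : Prop := ∀ (avg : Int × Int × Int) (colors : List (Int × Int × Int)), Dom_get_majority_interval avg colors → Spec_get_majority_interval avg colors (get_majority_interval avg colors)

-- ===== LEMMAS AND PROOFS =====

-- A's fold computes the three below-average counts
theorem gmi_foldl_counts (avg : Int × Int × Int) (colors : List (Int × Int × Int))
    (s : Int × Int × Int) :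
    colors.foldl (fun (s : Int × Int × Int) c =>
      (s.1 + (if c.1 < avg.1 then 1 else 0),
       s.2.1 + (if c.2.1 < avg.2.1 then 1 else 0),
       s.2.2 + (if c.2.2 < avg.2.2 then 1 else 0))) s
    = (s.1 + (colors.countP (fun c => decide (c.1 < avg.1)) : Int),
       s.2.1 + (colors.countP (fun c => decide (c.2.1 < avg.2.1)) : Int),
       s.2.2 + (colors.countP (fun c => decide (c.2.2 < avg.2.2)) : Int)) := by
  induction colors generalizing s with
  | nil => simp
  | cons c cs ih =>
    simp only [List.foldl_cons, List.countP_cons, ih]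
    obtain ⟨s1, s2, s3⟩ := s
    simp only [Prod.mk.injEq]
    refine ⟨?_, ?_, ?_⟩ <;> split_ifs <;> simp_all <;> omega

-- in a ≤-ordered list, the (k+1)-th element is ≥ a iff at most k elements are < a
theorem getD_ge_iff_countP_le (s : List Int) (hs : s.Pairwise (· ≤ ·)) (k : Nat)
    (hk : k < s.length) (a : Int) :
    (a ≤ s.getD k 0) ↔ s.countP (fun x => decide (x < a)) ≤ k := by
  induction s generalizing k with
  | nil => simp at hk
  | cons x xs ih =>
    rw [List.pairwise_cons] at hs
    obtain ⟨hx, hxs⟩ := hs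
    cases k with
    | zero =>
      simp only [List.getD_cons_zero, List.countP_cons, Nat.le_zero]
      constructor
      · intro hax
        have h0 : xs.countP (fun x => decide (x < a)) = 0 := by
          rw [List.countP_eq_zero]
          intro y hy
          simp only [decide_eq_true_eq]
          exact fun h => absurd (lt_of_lt_of_le h hax) (not_lt.mpr (hx y hy))
        simp [h0, not_lt.mpr hax]
      · intro h
        by_contra hax
        simp [not_le.mp hax] at h
    | succ k =>
      simp only [List.getD_cons_succ, List.countP_cons]
      by_cases hxa : x < a
      · rw [ih hxs k (by simpa using hk)]
        simp [hxa]
      · have hax : a ≤ x := not_lt.mp hxa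
        have hk' : k < xs.length := by simpa using hk
        have h0 : xs.countP (fun x => decide (x < a)) = 0 := by
          rw [List.countP_eq_zero]
          intro y hy
          simp only [decide_eq_true_eq]
          exact fun h => absurd (lt_of_lt_of_le h hax) (not_lt.mpr (hx y hy))
        have hle : a ≤ xs.getD k 0 := by
          rw [List.getD_eq_getElem _ _ hk']
          exact le_trans hax (hx _ (List.getElem_mem hk'))
        rw [List.getD_eq_getElem?_getD] at hle
        simp [hxa, h0, hle]

-- per channel: A's threshold test equals B's sorted-median test
theorem gmi_channel_eq (a : Int) (l : List Int) (hne : l ≠ []) :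
    (if 2 * ((l.countP (fun x => decide (x < a)) : Nat) : Int) < (l.length : Int) then (1 : Int) else 0)
    = gmiChannel a l ((l.length - 1) / 2) := by
  unfold gmiChannel
  have hlen : 0 < l.length := List.length_pos_iff.mpr hne
  have hperm := PySem.List.sorted_perm (xs := l) (key := fun x => x) (rev := false)
  have hpw : (PySem.List.sorted l (fun x => x) false).Pairwise (· ≤ ·) := by
    simpa using PySem.List.sorted_pairwise (xs := l) (key := fun x => x)
  have hk : (l.length - 1) / 2 < (PySem.List.sorted l (fun x => x) false).length := by
    rw [hperm.length_eq]; omega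
  have hcnt : (PySem.List.sorted l (fun x => x) false).countP (fun x => decide (x < a))
      = l.countP (fun x => decide (x < a)) := hperm.countP_eq _
  have key : (2 * ((l.countP (fun x => decide (x < a)) : Nat) : Int) < (l.length : Int))
      ↔ (a ≤ (PySem.List.sorted l (fun x => x) false).getD ((l.length - 1) / 2) 0) := by
    rw [getD_ge_iff_countP_le _ hpw _ hk a, hcnt]
    omega
  exact if_congr key rfl rfl

-- ===== VERDICT (by name: the statement is the Claim_ definition above) =====
theorem get_majority_interval_spec : Claim_equal_get_majority_interval := by
  intro avg colors _
  unfold Spec_get_majority_interval get_majority_interval get_majority_interval_alt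
  by_cases hne : colors = []
  · subst hne; simp
  · simp only [if_neg hne, gmi_foldl_counts, zero_add]
    have h1 := gmi_channel_eq avg.1 (colors.map (fun c => c.1)) (by simpa using hne)
    have h2 := gmi_channel_eq avg.2.1 (colors.map (fun c => c.2.1)) (by simpa using hne)
    have h3 := gmi_channel_eq avg.2.2 (colors.map (fun c => c.2.2)) (by simpa using hne)
    simp only [List.countP_map, List.length_map, Function.comp_def] at h1 h2 h3
    rw [← h1, ← h2, ← h3]
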